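-- pv_equiv track=rewrite | github.com/Madi-S/Competitive-Programming-On-Python | Kata Challenges/FIRE and FURY.py | fire_and_fury
-- ===== SOURCE A (Python) =====
-- def fire_and_fury(tweet):
--     if not tweet.count('FIRE') and not tweet.count('FURY'):
--         return 'Fake tweet.'
--
--     unique_letters = set(tweet)
--     working_letters = 'EFIRUY'
--
--     while unique_letters:
--         if not unique_letters.pop() in working_letters:
--             return 'Fake tweet.'
--
--     i = 0
--     res = ''
--     fire_count = 0
--     fury_count = 0
--     length = len(tweet)
--
--     while i + 4 <= length:
--         word = tweet[i: i + 4]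
--         if word == 'FIRE':
--             fire_count += 1
--             i += 4
--             if fury_count:
--                 res += ' I am {}furious.'.format('really ' * (fury_count - 1))
--                 fury_count = 0
--
--         elif word == 'FURY':
--             fury_count += 1
--             i += 4
--             if fire_count:
--                 res += ' You {}are fired!'.format(
--                     'and you ' * (fire_count - 1))
--                 fire_count = 0
--
--         else:
--             i += 1
--
--     if fire_count:
--         res += ' You {}are fired!'.format('and you ' * (fire_count - 1))
--     if fury_count:
--         res += ' I am {}furious.'.format('really ' * (fury_count - 1))
--
--     return res[1:]
-- ===== SOURCE B (Python) =====
-- def fire_and_fury(tweet):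
--     if not tweet.count('FIRE') and not tweet.count('FURY'):
--         return 'Fake tweet.'
--     if any(c not in 'EFIRUY' for c in tweet):
--         return 'Fake tweet.'
--
--     # tokenize: leftmost non-overlapping FIRE/FURY occurrences
--     tokens = []
--     i = 0
--     length = len(tweet)
--     while i + 4 <= length:
--         word = tweet[i:i + 4]
--         if word in ('FIRE', 'FURY'):
--             tokens.append(word)
--             i += 4
--         else:
--             i += 1
--
--     # group maximal consecutive runs as (token, count)
--     runs = []
--     for t in tokens:
--         if runs and runs[-1][0] == t:
--             runs[-1][1] += 1
--         else:
--             runs.append([t, 1])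
--
--     phrases = ['You ' + 'and you ' * (n - 1) + 'are fired!' if t == 'FIRE'
--                else 'I am ' + 'really ' * (n - 1) + 'furious.'
--                for t, n in runs]
--     return ' '.join(phrases)
-- ===== Notes on version B (the rewrite author's own statement) =====
-- stated objective: alternative
-- what changed: Replaces A's interleaved scan with fire_count/fury_count flush-on-switch state machine by a three-stage pipeline: materialize the FIRE/FURY token list, group maximal runs into (token,count) pairs, map each run to its phrase and join the phrases with single spaces (also replaces the set-pop character guard by an any() comprehension).
import Mathlib
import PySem

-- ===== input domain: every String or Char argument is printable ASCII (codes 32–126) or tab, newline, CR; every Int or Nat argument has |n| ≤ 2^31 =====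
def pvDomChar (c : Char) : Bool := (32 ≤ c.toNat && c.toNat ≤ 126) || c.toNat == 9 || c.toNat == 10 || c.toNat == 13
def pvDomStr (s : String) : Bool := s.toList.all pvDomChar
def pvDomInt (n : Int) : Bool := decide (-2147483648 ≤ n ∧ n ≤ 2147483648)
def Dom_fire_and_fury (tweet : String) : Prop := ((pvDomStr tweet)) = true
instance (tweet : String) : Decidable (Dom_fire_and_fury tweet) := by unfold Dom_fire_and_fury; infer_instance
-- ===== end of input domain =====

-- B replaces A's single scan with flush-on-switch counters by a tokenize → group-runs → map-to-phrases → join pipeline (alternative decomposition, same cost).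

-- ===== PORT A =====

-- 'and you ' * k  /  'really ' * k
def pvRep (s : List Char) (k : Nat) : List Char := (List.replicate k s).flatten

-- ' You {}are fired!'.format('and you ' * (n - 1))
def pvFireMsg (n : Nat) : List Char := " You ".toList ++ pvRep "and you ".toList (n - 1) ++ "are fired!".toList

-- ' I am {}furious.'.format('really ' * (n - 1))
def pvFuryMsg (n : Nat) : List Char := " I am ".toList ++ pvRep "really ".toList (n - 1) ++ "furious.".toList

-- the 'while unique_letters: if not unique_letters.pop() in working_letters: return …' loop;
-- CPython pops in unspecified hash order, but the result (is SOME element outside 'EFIRUY'?) is order-independent,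
-- so popping from the front of the PySem.Set list is a faithful choice.
def pvPopCheck : List Char → Bool
  | [] => false
  | c :: rest => if ¬ ("EFIRUY".toList.contains c) then true else pvPopCheck rest

-- the main 'while i + 4 <= length' scan; the list argument is tweet[i:], so 4 ≤ remaining length
-- is the loop guard and word = tweet[i:i+4] is the first four chars; i += 4 drops 4, i += 1 drops 1.
def pvLoopA : List Char → List Char → Nat → Nat → List Char
  | c1 :: c2 :: c3 :: c4 :: rest, res, fire, fury =>
    if [c1, c2, c3, c4] = "FIRE".toList then
      if fury ≠ 0 then pvLoopA rest (res ++ pvFuryMsg fury) (fire + 1) 0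
      else pvLoopA rest res (fire + 1) fury
    else if [c1, c2, c3, c4] = "FURY".toList then
      if fire ≠ 0 then pvLoopA rest (res ++ pvFireMsg fire) 0 (fury + 1)
      else pvLoopA rest res fire (fury + 1)
    else pvLoopA (c2 :: c3 :: c4 :: rest) res fire fury
  | _, res, fire, fury =>
    (res ++ (if fire ≠ 0 then pvFireMsg fire else [])) ++ (if fury ≠ 0 then pvFuryMsg fury else [])
termination_by l => l.length
decreasing_by all_goals (simp <;> omega)

def fire_and_fury (tweet : String) : String :=
  if PySem.Str.count tweet "FIRE" = 0 ∧ PySem.Str.count tweet "FURY" = 0 then "Fake tweet."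
  else if pvPopCheck (PySem.Set.ofList tweet.toList) then "Fake tweet."
  else String.ofList (PySem.List.slice (pvLoopA tweet.toList [] 0 0) (some 1) none)  -- res[1:]

-- ===== PORT B =====

-- tokenize: leftmost non-overlapping 'FIRE'/'FURY' matches, left to right
def pvTokens : List Char → List (List Char)
  | c1 :: c2 :: c3 :: c4 :: rest =>
    if [c1, c2, c3, c4] = "FIRE".toList ∨ [c1, c2, c3, c4] = "FURY".toList then
      [c1, c2, c3, c4] :: pvTokens rest
    else pvTokens (c2 :: c3 :: c4 :: rest)
  | _ => []
termination_by l => l.length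
decreasing_by all_goals (simp <;> omega)

-- 'if runs and runs[-1][0] == t: runs[-1][1] += 1 else: runs.append([t, 1])'
def pvAddRun (runs : List (List Char × Nat)) (t : List Char) : List (List Char × Nat) :=
  match runs.getLast? with
  | some (t', n) => if t' = t then runs.dropLast ++ [(t', n + 1)] else runs ++ [(t, 1)]
  | none => [(t, 1)]

-- the phrase for one (token, count) run
def pvPhrase (p : List Char × Nat) : List Char :=
  if p.1 = "FIRE".toList then "You ".toList ++ pvRep "and you ".toList (p.2 - 1) ++ "are fired!".toList
  else "I am ".toList ++ pvRep "really ".toList (p.2 - 1) ++ "furious.".toList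

def fire_and_fury_alt (tweet : String) : String :=
  if PySem.Str.count tweet "FIRE" = 0 ∧ PySem.Str.count tweet "FURY" = 0 then "Fake tweet."
  else if tweet.toList.any (fun c => ¬ ("EFIRUY".toList.contains c)) then "Fake tweet."
  else String.ofList (PySem.Chars.join " ".toList
    (((pvTokens tweet.toList).foldl pvAddRun []).map pvPhrase))  -- ' '.join(phrases)

-- ===== PRECONDITION & SPEC =====
def Spec_fire_and_fury (tweet : String) (out : String) : Prop := out = fire_and_fury_alt tweet
instance (tweet : String) (out : String) : Decidable (Spec_fire_and_fury tweet out) := by unfold Spec_fire_and_fury; infer_instance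

-- ===== CLAIM (what is proved, stated in full; the proofs are below) =====
def Claim_equal_fire_and_fury : Prop := ∀ (tweet : String), Dom_fire_and_fury tweet → Spec_fire_and_fury tweet (fire_and_fury tweet)

-- ===== LEMMAS AND PROOFS =====

-- group runs, with a run of token t of length n in progress
def pvGrp1 (t : List Char) (n : Nat) : List (List Char) → List (List Char × Nat)
  | [] => [(t, n)]
  | s :: ts => if t = s then pvGrp1 t (n + 1) ts else (t, n) :: pvGrp1 s 1 ts

-- each phrase prefixed by one space, concatenated (the shape A's res accumulator produces)
def pvCat (ps : List (List Char × Nat)) : List Char := (ps.map (fun p => ' ' :: pvPhrase p)).flatten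

-- A's pending counters rendered against the remaining token stream
def pvEmit : List (List Char) → Nat → Nat → List Char
  | [], fire, fury => (if fire ≠ 0 then pvFireMsg fire else []) ++ (if fury ≠ 0 then pvFuryMsg fury else [])
  | t :: ts, fire, fury =>
    if t = "FIRE".toList then (if fury ≠ 0 then pvFuryMsg fury else []) ++ pvEmit ts (fire + 1) 0
    else (if fire ≠ 0 then pvFireMsg fire else []) ++ pvEmit ts 0 (fury + 1)

theorem pvPopCheck_eq_any (s : List Char) :
    pvPopCheck s = s.any (fun c => ¬ ("EFIRUY".toList.contains c)) := by
  induction s with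
  | nil => rfl
  | cons c rest ih =>
    simp only [pvPopCheck, List.any_cons]
    by_cases h : ("EFIRUY".toList.contains c) = true <;> simp [ih]

theorem pvGuard2_eq (l : List Char) :
    pvPopCheck (PySem.Set.ofList l) = l.any (fun c => ¬ ("EFIRUY".toList.contains c)) := by
  rw [pvPopCheck_eq_any]
  apply Bool.eq_iff_iff.mpr
  simp only [List.any_eq_true, PySem.Set.mem_ofList]

theorem pvLoopA_eq_emit (l : List Char) : ∀ (res : List Char) (fire fury : Nat),
    pvLoopA l res fire fury = res ++ pvEmit (pvTokens l) fire fury := by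
  induction l using pvTokens.induct with
  | case1 c1 c2 c3 c4 rest h ih =>
    intro res fire fury
    rcases h with hF | hU
    · have hor : [c1, c2, c3, c4] = "FIRE".toList ∨ [c1, c2, c3, c4] = "FURY".toList := Or.inl hF
      rw [pvLoopA, pvTokens, if_pos hor, pvEmit, if_pos hF, if_pos hF]
      by_cases hu : fury ≠ 0
      · simp [hu, ih, List.append_assoc]
      · simp only [ne_eq, not_not] at hu; simp [hu, ih]
    · have hor : [c1, c2, c3, c4] = "FIRE".toList ∨ [c1, c2, c3, c4] = "FURY".toList := Or.inr hU
      have hne : ¬ ([c1, c2, c3, c4] = "FIRE".toList) := by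
        intro hc; rw [hU] at hc; simp at hc
      rw [pvLoopA, pvTokens, if_pos hor, pvEmit, if_neg hne, if_neg hne, if_pos hU]
      by_cases hf : fire ≠ 0
      · simp [hf, ih, List.append_assoc]
      · simp only [ne_eq, not_not] at hf; simp [hf, ih]
  | case2 c1 c2 c3 c4 rest h ih =>
    intro res fire fury
    rw [not_or] at h
    have hor : ¬ ([c1, c2, c3, c4] = "FIRE".toList ∨ [c1, c2, c3, c4] = "FURY".toList) := by tauto
    rw [pvLoopA, pvTokens, if_neg h.1, if_neg h.2, if_neg hor]
    exact ih res fire fury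
  | case3 l h =>
    intro res fire fury
    -- l has fewer than four elements: both functions hit their fallback case
    rcases l with _ | ⟨a, _ | ⟨b, _ | ⟨c, _ | ⟨d, tl⟩⟩⟩⟩
    · simp [pvLoopA, pvTokens, pvEmit]
    · simp [pvLoopA, pvTokens, pvEmit]
    · simp [pvLoopA, pvTokens, pvEmit]
    · simp [pvLoopA, pvTokens, pvEmit]
    · exact (h a b c d tl rfl).elim

theorem pvFoldl_addRun (ts : List (List Char)) :
    ∀ (rs : List (List Char × Nat)) (t : List Char) (n : Nat),
    ts.foldl pvAddRun (rs ++ [(t, n)]) = rs ++ pvGrp1 t n ts := by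
  induction ts with
  | nil => intro rs t n; simp [pvGrp1]
  | cons s ts ih =>
    intro rs t n
    simp only [List.foldl_cons, pvGrp1]
    have hstep : pvAddRun (rs ++ [(t, n)]) s =
        if t = s then rs ++ [(t, n + 1)] else (rs ++ [(t, n)]) ++ [(s, 1)] := by
      simp [pvAddRun]
    by_cases h : t = s
    · rw [hstep, if_pos h, if_pos h, ih, h]
    · rw [hstep, if_neg h, if_neg h, ih, List.append_assoc]; rfl

theorem pvTokens_mem (l : List Char) :
    ∀ s ∈ pvTokens l, s = "FIRE".toList ∨ s = "FURY".toList := by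
  induction l using pvTokens.induct with
  | case1 c1 c2 c3 c4 rest h ih =>
    rw [pvTokens, if_pos h]
    intro s hs
    rcases List.mem_cons.1 hs with hs1 | hs1
    · subst hs1; exact h
    · exact ih s hs1
  | case2 c1 c2 c3 c4 rest h ih =>
    rw [pvTokens, if_neg h]
    exact ih
  | case3 l h =>
    rcases l with _ | ⟨a, _ | ⟨b, _ | ⟨c, _ | ⟨d, tl⟩⟩⟩⟩
    · simp [pvTokens]
    · simp [pvTokens]
    · simp [pvTokens]
    · simp [pvTokens]
    · exact (h a b c d tl rfl).elim

theorem pvFireMsg_eq (n : Nat) : pvFireMsg n = ' ' :: pvPhrase ("FIRE".toList, n) := by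
  simp [pvFireMsg, pvPhrase]

theorem pvFuryMsg_eq (n : Nat) : pvFuryMsg n = ' ' :: pvPhrase ("FURY".toList, n) := by
  simp [pvFuryMsg, pvPhrase]

theorem pvEmit_eq_cat (ts : List (List Char)) :
    ∀ (t : List Char) (n fire fury : Nat), n ≠ 0 →
    (∀ s ∈ ts, s = "FIRE".toList ∨ s = "FURY".toList) →
    ((t = "FIRE".toList ∧ fire = n ∧ fury = 0) ∨ (t = "FURY".toList ∧ fire = 0 ∧ fury = n)) →
    pvEmit ts fire fury = pvCat (pvGrp1 t n ts) := by
  have hUF : ¬ ("FURY".toList = "FIRE".toList) := by decide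
  induction ts with
  | nil =>
    rintro t n fire fury hn _ (⟨rfl, rfl, rfl⟩ | ⟨rfl, rfl, rfl⟩)
    · simp [pvEmit, pvGrp1, pvCat, hn, pvFireMsg_eq]
    · simp [pvEmit, pvGrp1, pvCat, hn, pvFuryMsg_eq]
  | cons s ts ih =>
    rintro t n fire fury hn hall hcase
    have hs := hall s (by simp)
    have hrest : ∀ x ∈ ts, x = "FIRE".toList ∨ x = "FURY".toList :=
      fun x hx => hall x (by simp [hx])
    rcases hcase with ⟨rfl, rfl, rfl⟩ | ⟨rfl, rfl, rfl⟩ <;> rcases hs with rfl | hs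
    · -- FIRE run continues with another FIRE
      have := ih "FIRE".toList (fire + 1) (fire + 1) 0 (by omega) hrest (Or.inl ⟨rfl, rfl, rfl⟩)
      simpa [pvEmit, pvGrp1] using this
    · -- FIRE run ends, a FURY starts
      rw [hs]
      have := ih "FURY".toList 1 0 1 one_ne_zero hrest (Or.inr ⟨rfl, rfl, rfl⟩)
      simp [pvEmit, pvGrp1, pvCat, hn, pvFireMsg_eq, this]
    · -- FURY run ends, a FIRE starts
      have := ih "FIRE".toList 1 1 0 one_ne_zero hrest (Or.inl ⟨rfl, rfl, rfl⟩)
      simp [pvEmit, pvGrp1, pvCat, hn, pvFuryMsg_eq, this]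
    · -- FURY run continues with another FURY
      rw [hs]
      have := ih "FURY".toList (fury + 1) 0 (fury + 1) (by omega) hrest (Or.inr ⟨rfl, rfl, rfl⟩)
      simpa [pvEmit, pvGrp1, hUF] using this

theorem pvJoin_cons (sep : List Char) (xs : List (List Char)) : ∀ x,
    PySem.Chars.join sep (x :: xs) = x ++ (xs.map (fun y => sep ++ y)).flatten := by
  induction xs with
  | nil => intro x; simp [PySem.Chars.join_singleton]
  | cons q qs ih =>
    intro x
    rw [PySem.Chars.join_cons_cons, ih q]
    simp

theorem pvJoin_eq_cat_drop (ps : List (List Char × Nat)) :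
    PySem.Chars.join " ".toList (ps.map pvPhrase) = (pvCat ps).drop 1 := by
  cases ps with
  | nil => simp [pvCat, PySem.Chars.join_nil]
  | cons p ps =>
    rw [List.map_cons, pvJoin_cons]
    simp [pvCat, List.map_map, Function.comp_def]

theorem pvMain_eq (l : List Char) :
    (pvLoopA l [] 0 0).drop 1 =
      PySem.Chars.join " ".toList (((pvTokens l).foldl pvAddRun []).map pvPhrase) := by
  rw [pvLoopA_eq_emit, List.nil_append]
  cases htoks : pvTokens l with
  | nil => simp [pvEmit, PySem.Chars.join_nil]
  | cons t ts =>
    have hall := pvTokens_mem l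
    rw [htoks] at hall
    have ht := hall t (by simp)
    have hrest : ∀ x ∈ ts, x = "FIRE".toList ∨ x = "FURY".toList :=
      fun x hx => hall x (by simp [hx])
    have hfold : (t :: ts).foldl pvAddRun [] = pvGrp1 t 1 ts := by
      have := pvFoldl_addRun ts [] t 1
      simpa using this
    rw [hfold, pvJoin_eq_cat_drop]
    congr 1
    rcases ht with rfl | rfl
    · have hemit := pvEmit_eq_cat ts "FIRE".toList 1 1 0 one_ne_zero hrest (Or.inl ⟨rfl, rfl, rfl⟩)
      simp [pvEmit, hemit]
    · have hemit := pvEmit_eq_cat ts "FURY".toList 1 0 1 one_ne_zero hrest (Or.inr ⟨rfl, rfl, rfl⟩)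
      simp [pvEmit, hemit]

-- ===== VERDICT (by name: the statement is the Claim_ definition above) =====
theorem fire_and_fury_spec : Claim_equal_fire_and_fury := by
  intro tweet _
  unfold Spec_fire_and_fury fire_and_fury fire_and_fury_alt
  by_cases h1 : PySem.Str.count tweet "FIRE" = 0 ∧ PySem.Str.count tweet "FURY" = 0
  · rw [if_pos h1, if_pos h1]
  · rw [if_neg h1, if_neg h1, pvGuard2_eq]
    by_cases h2 : tweet.toList.any (fun c => ¬ ("EFIRUY".toList.contains c)) = true
    · rw [if_pos h2, if_pos h2]
    · rw [if_neg h2, if_neg h2]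
      have hslice : PySem.List.slice (pvLoopA tweet.toList [] 0 0) (some 1) none
          = (pvLoopA tweet.toList [] 0 0).drop 1 := by
        rw [show (1 : Int) = ((1 : Nat) : Int) by norm_num, PySem.List.slice_from_natCast]
      rw [hslice, pvMain_eq]
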